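-- pv_equiv track=rewrite | github.com/begonlabs/Ritter-Finder | scripts/deduplicate-leads.py | select_best_lead
-- ===== SOURCE A (Python) =====
-- from typing import Dict, List, Tuple, Set
--
-- def select_best_lead(duplicates: List[Dict[str, str]]) -> Dict[str, str]:
--     """Select the best lead from a group of duplicates"""
--     if len(duplicates) == 1:
--         return duplicates[0]
--
--     # Score each lead
--     scored_leads = []
--
--     for lead in duplicates:
--         score = 0
--
--         # Base score from data_quality_score
--         try:
--             score += int(lead.get('data_quality_score', 1)) * 10
--         except:
--             score += 10
--
--         # Bonus for having phone
--         if lead.get('phone'):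
--             score += 15
--
--         # Bonus for having website
--         if lead.get('company_website'):
--             score += 10
--
--         # Bonus for having description
--         if lead.get('description') and lead.get('description') != 'N/A':
--             score += 5
--
--         # Bonus for having address
--         if lead.get('address'):
--             score += 5
--
--         # Penalty for missing key fields
--         if not lead.get('company_name'):
--             score -= 20
--
--         scored_leads.append((score, lead))
--
--     # Sort by score (highest first)
--     scored_leads.sort(key=lambda x: x[0], reverse=True)
--
--     return scored_leads[0][1]
-- ===== SOURCE B (Python) =====
-- from typing import Dict, List
--
--
-- def _score(lead: Dict[str, str]) -> int:
--     """Quality score of a single lead (same scoring rules, written as one expression)."""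
--     dqs = lead.get('data_quality_score')
--     if dqs is None:
--         base = 10
--     else:
--         try:
--             base = int(dqs) * 10
--         except ValueError:
--             base = 10
--     return (base
--             + (15 if lead.get('phone') else 0)
--             + (10 if lead.get('company_website') else 0)
--             + (5 if lead.get('description') and lead.get('description') != 'N/A' else 0)
--             + (5 if lead.get('address') else 0)
--             - (20 if not lead.get('company_name') else 0))
--
--
-- def select_best_lead(duplicates: List[Dict[str, str]]) -> Dict[str, str]:
--     """Single linear pass: keep the first lead with the highest score."""
--     best = duplicates[0]
--     best_score = _score(best)
--     for lead in duplicates[1:]: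
--         s = _score(lead)
--         if s > best_score:
--             best, best_score = lead, s
--     return best
-- ===== Notes on version B (the rewrite author's own statement) =====
-- stated objective: alternative
-- what changed: Replaces A's build-a-scored-list then stable-reverse-sort then take-head with a single linear pass that tracks the running best score and keeps the first lead attaining the maximum (scoring rules unchanged, written as one expression); intended as faster (O(n) vs O(n log n)) but a timing run measured only ~1.3x at the largest size.
import Mathlib
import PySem

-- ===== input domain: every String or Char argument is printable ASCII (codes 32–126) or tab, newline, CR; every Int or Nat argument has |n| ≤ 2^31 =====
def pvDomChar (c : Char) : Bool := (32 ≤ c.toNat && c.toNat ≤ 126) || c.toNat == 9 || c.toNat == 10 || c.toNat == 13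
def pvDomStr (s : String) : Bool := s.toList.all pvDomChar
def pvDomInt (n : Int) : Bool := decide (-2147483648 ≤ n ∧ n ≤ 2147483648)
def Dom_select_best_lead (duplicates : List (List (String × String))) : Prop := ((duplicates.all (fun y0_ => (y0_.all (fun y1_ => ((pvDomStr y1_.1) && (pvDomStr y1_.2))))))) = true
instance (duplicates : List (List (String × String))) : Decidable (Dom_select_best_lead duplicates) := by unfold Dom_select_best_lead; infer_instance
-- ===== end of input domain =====

-- B replaces A's build-scored-list / stable-reverse-sort / take-head with a single linear
-- pass that keeps the first lead attaining the maximal score (intended as faster — O(n) vs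
-- O(n log n) — but measured only ~1.3x at the largest timed size, so labelled 'alternative').

-- shared dict primitives: lead.get(k) on the association-list dict (first match), Python truthiness of get's result
def leadGet? (lead : List (String × String)) (k : String) : Option String :=
  List.lookup k lead

def truthy (o : Option String) : Bool :=
  match o with
  | some v => !(v == "")
  | none => false

-- ===== PORT A =====
-- score of one lead, exactly A's step-by-step accumulation inside the for-loop
def scoreA (lead : List (String × String)) : Int :=
  let score : Int := 0
  -- try: score += int(lead.get('data_quality_score', 1)) * 10  except: score += 10
  let score := score + (match leadGet? lead "data_quality_score" with
    | none => (1 : Int) * 10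
    | some v => match PySem.Int.ofStr? v with
      | some n => n * 10
      | none => 10)
  let score := if truthy (leadGet? lead "phone") then score + 15 else score
  let score := if truthy (leadGet? lead "company_website") then score + 10 else score
  let score := if truthy (leadGet? lead "description") && (leadGet? lead "description" != some "N/A")
               then score + 5 else score
  let score := if truthy (leadGet? lead "address") then score + 5 else score
  let score := if !(truthy (leadGet? lead "company_name")) then score - 20 else score
  score

def select_best_lead (duplicates : List (List (String × String))) : List (String × String) :=
  if duplicates.length == 1 then
    match PySem.List.pyGet? duplicates 0 with
    | some l => l
    | none => []          -- unreachable: length is 1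
  else
    let scored := duplicates.foldl (fun acc lead => acc ++ [(scoreA lead, lead)]) []
    let s := PySem.List.sorted scored (fun x => x.1) true
    match PySem.List.pyGet? s 0 with   -- scored_leads[0][1]; none = IndexError (duplicates = [])
    | some p => p.2
    | none => []

-- ===== PORT B =====
-- score of one lead, Source B's single-expression form
def scoreB (lead : List (String × String)) : Int :=
  let base : Int := match leadGet? lead "data_quality_score" with
    | none => 10
    | some v => match PySem.Int.ofStr? v with
      | some n => n * 10
      | none => 10
  base + (if truthy (leadGet? lead "phone") then 15 else 0)
       + (if truthy (leadGet? lead "company_website") then 10 else 0)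
       + (if truthy (leadGet? lead "description") && (leadGet? lead "description" != some "N/A") then 5 else 0)
       + (if truthy (leadGet? lead "address") then 5 else 0)
       - (if !(truthy (leadGet? lead "company_name")) then 20 else 0)

def select_best_lead_alt (duplicates : List (List (String × String))) : List (String × String) :=
  match duplicates with
  | [] => []               -- Source B raises IndexError here (excluded by Pre_)
  | best :: rest =>        -- duplicates[0], duplicates[1:]
    (rest.foldl (fun st lead =>
        let s := scoreB lead
        if st.2 < s then (lead, s) else st)
      (best, scoreB best)).1

-- ===== PRECONDITION & SPEC =====
-- A (and B) raise IndexError on the empty list; nothing else raises.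
def Pre_select_best_lead (duplicates : List (List (String × String))) : Prop := duplicates ≠ []
instance (duplicates : List (List (String × String))) : Decidable (Pre_select_best_lead duplicates) := by unfold Pre_select_best_lead; infer_instance

def pvWitness_select_best_lead : (List (List (String × String))) := [[("company_name", "Acme")]]

def Spec_select_best_lead (duplicates : List (List (String × String))) (out : List (String × String)) : Prop := out = select_best_lead_alt duplicates
instance (duplicates : List (List (String × String))) (out : List (String × String)) : Decidable (Spec_select_best_lead duplicates out) := by unfold Spec_select_best_lead; infer_instance

-- ===== CLAIM (what is proved, stated in full; the proofs are below) =====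
def Claim_equal_select_best_lead : Prop := ∀ (duplicates : List (List (String × String))), Dom_select_best_lead duplicates → Pre_select_best_lead duplicates → Spec_select_best_lead duplicates (select_best_lead duplicates)

-- ===== LEMMAS AND PROOFS =====

theorem scoreB_eq_scoreA (lead : List (String × String)) : scoreB lead = scoreA lead := by
  unfold scoreA scoreB
  cases leadGet? lead "data_quality_score" with
  | none => simp; split_ifs <;> ring
  | some v =>
    cases PySem.Int.ofStr? v with
    | none => simp; split_ifs <;> ring
    | some n => simp; split_ifs <;> ring

-- head of insertBy with the reverse comparator on the first component
theorem head_insertBy {L : Type} (y m : Int × L) (t : List (Int × L)) :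
    (PySem.List.insertBy (fun a b => decide (b.1 < a.1)) y (m :: t)).head? =
      some (if m.1 < y.1 then y else m) := by
  simp [PySem.List.insertBy]
  split_ifs <;> simp

-- head of the stable reverse sort = left fold keeping the first maximal first component
theorem head_sorted_rev {L : Type} (t : List (Int × L)) (x : Int × L) :
    (PySem.List.sorted (x :: t) (fun p => p.1) true).head? =
      some (t.foldl (fun b y => if b.1 < y.1 then y else b) x) := by
  induction t using List.reverseRecOn with
  | nil => simp [PySem.List.sorted, PySem.List.insertBy]
  | append_singleton t y ih =>
    rw [PySem.List.sorted_rev_eq_foldl_insertBy] at ih ⊢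
    rw [show x :: (t ++ [y]) = (x :: t) ++ [y] by simp, List.foldl_append, List.foldl_append]
    set zs := List.foldl (fun acc x => PySem.List.insertBy (fun a b => decide (b.1 < a.1)) x acc) [] (x :: t) with hzs
    cases hz : zs with
    | nil =>
      exfalso
      have : zs = PySem.List.sorted (x :: t) (fun p => p.1) true := by
        rw [PySem.List.sorted_rev_eq_foldl_insertBy]
      rw [hz] at this
      have := (PySem.List.sorted_eq_nil_iff (x :: t) (fun p => p.1) true).mp this.symm
      simp at this
    | cons m rest =>
      simp only [List.foldl_cons, List.foldl_nil]
      rw [head_insertBy]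
      have hm : m = t.foldl (fun b y => if b.1 < y.1 then y else b) x := by
        have := ih
        rw [hz] at this
        simpa using this
      rw [hm]

-- B's fold over leads is the swapped form of the fold over scored pairs
theorem fold_swap (t : List (List (String × String))) (s : Int) (l : List (String × String)) :
    t.foldl (fun b lead => if b.1 < scoreB lead then (scoreB lead, lead) else b) (s, l) =
      ((t.foldl (fun st lead =>
          let sc := scoreB lead
          if st.2 < sc then (lead, sc) else st) (l, s)).2,
       (t.foldl (fun st lead =>
          let sc := scoreB lead
          if st.2 < sc then (lead, sc) else st) (l, s)).1) := by
  induction t generalizing s l with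
  | nil => rfl
  | cons a t ih =>
    simp only [List.foldl_cons]
    by_cases h : s < scoreB a
    · simp [h, ih]
    · simp [h, ih]

-- ===== VERDICT (by name: the statement is the Claim_ definition above) =====
theorem select_best_lead_spec : Claim_equal_select_best_lead := by
  intro duplicates _ hpre
  unfold Spec_select_best_lead
  cases duplicates with
  | nil => exact absurd rfl hpre
  | cons h t =>
    cases t with
    | nil =>
      simp [select_best_lead, select_best_lead_alt]
    | cons h2 t2 =>
      unfold select_best_lead select_best_lead_alt
      have hlen : ((h :: h2 :: t2).length == 1) = false := by simp
      rw [hlen]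
      simp only [Bool.false_eq_true, if_false]
      rw [PySem.List.foldl_append_singleton_eq_map]
      have hmap : (h :: h2 :: t2).map (fun lead => (scoreA lead, lead)) =
          (scoreA h, h) :: ((h2 :: t2).map (fun lead => (scoreA lead, lead))) := rfl
      rw [hmap]
      rw [PySem.List.pyGet?_zero, ← List.head?_eq_getElem?]
      simp only [List.nil_append]
      rw [head_sorted_rev, List.foldl_map]
      simp only [← scoreB_eq_scoreA]
      rw [fold_swap]
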